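-- pv_equiv track=rewrite | github.com/kdj0712/coding_test | 프로그래머스/0/120956. 옹알이 （1）/옹알이 （1）.py | solution
-- ===== SOURCE A (Python) =====
-- def solution(babbling):
--     def generate_combinations(possibles, max_length):
--         def recurse(current, remaining, results):
--             if 0 < len(current) <= max_length:
--                 results.add(''.join(current))
--                 results.add(''.join(current[::-1]))
--             if len(current) == max_length or not remaining:
--                 return
--             for i in range(len(remaining)):
--                 next_chars = current + [remaining[i]]
--                 recurse(next_chars, remaining[:i] + remaining[i+1:], results)
--         results = set()
--         recurse([], possibles, results)
--         return list(results)
--     possibles = ["aya", "ye", "woo", "ma" ]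
--     answer = 0
--     combinations = generate_combinations(possibles, 4)
--     for x in range(len(babbling)):
--         if babbling[x] in combinations:
--             answer = answer + 1
--         else:
--             pass
--     return answer
-- ===== SOURCE B (Python) =====
-- def solution(babbling):
--     # Single-pass greedy parse per entry (valid because the four words start with
--     # distinct letters, hence are prefix-free): no combination generation.
--     def ok(w):
--         used = set()
--         while w:
--             for word in ("aya", "ye", "woo", "ma"):
--                 if w.startswith(word) and word not in used:
--                     used.add(word)
--                     w = w[len(word):]
--                     break
--             else:
--                 return False
--         return bool(used)
--     return sum(1 for w in babbling if ok(w))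
-- ===== Notes on version B (the rewrite author's own statement) =====
-- stated objective: alternative
-- what changed: A precomputes the set of all 64 concatenations of nonempty sequences of distinct words via a permutation-generating recursion and membership-tests each entry against that list; B instead greedily parses each entry left-to-right (the four words start with distinct letters, so they are prefix-free and the parse is deterministic), tracking which words were already used.
import Mathlib
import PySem

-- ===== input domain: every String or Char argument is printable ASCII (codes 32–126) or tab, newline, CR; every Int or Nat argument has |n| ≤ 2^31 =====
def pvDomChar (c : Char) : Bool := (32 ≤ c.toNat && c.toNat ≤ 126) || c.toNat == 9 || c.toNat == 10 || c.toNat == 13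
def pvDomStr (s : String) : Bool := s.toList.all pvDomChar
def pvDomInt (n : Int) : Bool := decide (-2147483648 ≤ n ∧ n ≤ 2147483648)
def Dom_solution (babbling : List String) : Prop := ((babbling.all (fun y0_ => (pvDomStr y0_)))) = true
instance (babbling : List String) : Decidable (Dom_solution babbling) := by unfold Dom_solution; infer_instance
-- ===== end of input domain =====

-- B replaces A's "generate all 64 distinct-word concatenations, then membership-test each entry"
-- by a single greedy left-to-right parse of each entry (no combination set is built).

-- ===== PORT A =====
-- A's recurse(current, remaining, results): the Python set `results` is threaded through the
-- calls; the fuel argument only makes the recursion structural (remaining shrinks by one per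
-- level, so fuel = len(possibles) + 1 is never exhausted); max_length is the literal 4.
def ayaRecurse : Nat → List String → List String → PySem.Set String → PySem.Set String
  | 0, _, _, results => results
  | fuel+1, current, remaining, results =>
    let results := if 0 < current.length ∧ current.length ≤ 4 then
        -- results.add(''.join(current)); results.add(''.join(current[::-1]))
        PySem.Set.add (PySem.Set.add results (PySem.Str.join "" current)) (PySem.Str.join "" current.reverse)
      else results
    if current.length = 4 ∨ remaining = [] then results
    else (List.range remaining.length).attach.foldl
      (fun res i => ayaRecurse fuel (current ++ [remaining[i.1]'(List.mem_range.mp i.2)])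
          (remaining.take i.1 ++ remaining.drop (i.1+1)) res)
      results

def solution (babbling : List String) : Int :=
  let possibles := ["aya", "ye", "woo", "ma"]
  let combinations := ayaRecurse (possibles.length + 1) [] possibles PySem.Set.empty
  (PySem.List.pyRange 0 (PySem.List.len babbling) 1).foldl
    (fun answer x => if PySem.List.pyGetD babbling x "" ∈ combinations then answer + 1 else answer) 0

-- ===== PORT B =====
-- Source B's ok(w): while w is nonempty, try each of the four words as a prefix not yet used
-- (the used-set becomes four Bool flags), else fail; succeed iff at least one word was used.
def okGo (cs : List Char) (a y w m : Bool) : Bool :=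
  if h : cs = [] then a || y || w || m
  else if PySem.Chars.startswith cs ['a','y','a'] && !a then okGo (cs.drop 3) true y w m
  else if PySem.Chars.startswith cs ['y','e'] && !y then okGo (cs.drop 2) a true w m
  else if PySem.Chars.startswith cs ['w','o','o'] && !w then okGo (cs.drop 3) a y true m
  else if PySem.Chars.startswith cs ['m','a'] && !m then okGo (cs.drop 2) a y w true
  else false
termination_by cs.length
decreasing_by
  all_goals (have := List.length_pos_iff.mpr h; simp [List.length_drop]; omega)

def solution_alt (babbling : List String) : Int :=
  babbling.foldl (fun acc w => if okGo w.toList false false false false then acc + 1 else acc) 0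

-- ===== PRECONDITION & SPEC =====
def Spec_solution (babbling : List String) (out : Int) : Prop := out = solution_alt babbling
instance (babbling : List String) (out : Int) : Decidable (Spec_solution babbling out) := by unfold Spec_solution; infer_instance

-- ===== CLAIM (what is proved, stated in full; the proofs are below) =====
def Claim_equal_solution : Prop := ∀ (babbling : List String), Dom_solution babbling → Spec_solution babbling (solution babbling)

-- ===== LEMMAS AND PROOFS =====

-- accAux n a y w m: the strings B's parser accepts from used-flag state (a,y,w,m), as char
-- lists, given enough fuel n (n > number of unused words).
def accAux : Nat → Bool → Bool → Bool → Bool → List (List Char)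
  | 0, _, _, _, _ => []
  | n+1, a, y, w, m =>
    (if a || y || w || m then [[]] else []) ++
    (if a then [] else (accAux n true y w m).map (['a','y','a'] ++ ·)) ++
    (if y then [] else (accAux n a true w m).map (['y','e'] ++ ·)) ++
    (if w then [] else (accAux n a y true m).map (['w','o','o'] ++ ·)) ++
    (if m then [] else (accAux n a y w true).map (['m','a'] ++ ·))

def numFalse (a y w m : Bool) : Nat := (cond a 0 1) + (cond y 0 1) + (cond w 0 1) + (cond m 0 1)

lemma mem_accAux_nil (n : Nat) (a y w m : Bool) :
    ([] : List Char) ∈ accAux (n+1) a y w m ↔ (a || y || w || m) = true := by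
  simp [accAux]

lemma mem_accAux_aya (n : Nat) (y w m : Bool) (r : List Char) :
    (['a','y','a'] ++ r) ∈ accAux (n+1) false y w m ↔ r ∈ accAux n true y w m := by
  simp [accAux]

lemma mem_accAux_ye (n : Nat) (a w m : Bool) (r : List Char) :
    (['y','e'] ++ r) ∈ accAux (n+1) a false w m ↔ r ∈ accAux n a true w m := by
  simp [accAux]

lemma mem_accAux_woo (n : Nat) (a y m : Bool) (r : List Char) :
    (['w','o','o'] ++ r) ∈ accAux (n+1) a y false m ↔ r ∈ accAux n a y true m := by
  simp [accAux]

lemma mem_accAux_ma (n : Nat) (a y w : Bool) (r : List Char) :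
    (['m','a'] ++ r) ∈ accAux (n+1) a y w false ↔ r ∈ accAux n a y w true := by
  simp [accAux]

lemma mem_accAux_cases {cs : List Char} {n : Nat} {a y w m : Bool}
    (h : cs ∈ accAux (n+1) a y w m) :
    cs = [] ∨ (a = false ∧ ['a','y','a'] <+: cs) ∨ (y = false ∧ ['y','e'] <+: cs) ∨
      (w = false ∧ ['w','o','o'] <+: cs) ∨ (m = false ∧ ['m','a'] <+: cs) := by
  simp only [accAux, List.mem_append] at h
  rcases h with (((h | h) | h) | h) | h
  · left
    by_cases hb : (a || y || w || m) = true <;> simp [hb] at h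
    simp [h]
  · by_cases hb : a = true <;> simp [hb] at h
    obtain ⟨r, _, rfl⟩ := h
    exact Or.inr (Or.inl ⟨by simpa using hb, r, rfl⟩)
  · by_cases hb : y = true <;> simp [hb] at h
    obtain ⟨r, _, rfl⟩ := h
    exact Or.inr (Or.inr (Or.inl ⟨by simpa using hb, r, rfl⟩))
  · by_cases hb : w = true <;> simp [hb] at h
    obtain ⟨r, _, rfl⟩ := h
    exact Or.inr (Or.inr (Or.inr (Or.inl ⟨by simpa using hb, r, rfl⟩)))
  · by_cases hb : m = true <;> simp [hb] at h
    obtain ⟨r, _, rfl⟩ := h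
    exact Or.inr (Or.inr (Or.inr (Or.inr ⟨by simpa using hb, r, rfl⟩)))

lemma okGo_iff (cs : List Char) (a y w m : Bool) :
    ∀ n, numFalse a y w m < n → (okGo cs a y w m = true ↔ cs ∈ accAux n a y w m) := by
  induction cs, a, y, w, m using okGo.induct with
  | case1 a y w m =>
      intro n hn
      obtain ⟨n', rfl⟩ : ∃ k, n = k + 1 := ⟨n - 1, by omega⟩
      rw [okGo, mem_accAux_nil]; simp
  | case2 cs a y w m hne hc IH =>
      intro n hn
      obtain ⟨n', rfl⟩ : ∃ k, n = k + 1 := ⟨n - 1, by omega⟩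
      obtain ⟨hs, ha⟩ := Bool.and_eq_true _ _ |>.mp hc
      rw [Bool.not_eq_eq_eq_not, Bool.not_true] at ha
      subst ha
      obtain ⟨r, rfl⟩ := (PySem.Chars.startswith_iff _ _).mp hs
      rw [okGo]
      simp only [hne, hc, dite_eq_ite, if_false, if_true]
      rw [show List.drop 3 (['a','y','a'] ++ r) = r from rfl, mem_accAux_aya]
      exact IH n' (by simp [numFalse] at hn ⊢; omega)
  | case3 cs a y w m hne h1 hc IH =>
      intro n hn
      obtain ⟨n', rfl⟩ : ∃ k, n = k + 1 := ⟨n - 1, by omega⟩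
      obtain ⟨hs, ha⟩ := Bool.and_eq_true _ _ |>.mp hc
      rw [Bool.not_eq_eq_eq_not, Bool.not_true] at ha
      subst ha
      obtain ⟨r, rfl⟩ := (PySem.Chars.startswith_iff _ _).mp hs
      rw [okGo]
      simp only [hne, h1, hc, dite_eq_ite, if_false, if_true]
      rw [show List.drop 2 (['y','e'] ++ r) = r from rfl, mem_accAux_ye]
      exact IH n' (by simp [numFalse] at hn ⊢; omega)
  | case4 cs a y w m hne h1 h2 hc IH =>
      intro n hn
      obtain ⟨n', rfl⟩ : ∃ k, n = k + 1 := ⟨n - 1, by omega⟩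
      obtain ⟨hs, ha⟩ := Bool.and_eq_true _ _ |>.mp hc
      rw [Bool.not_eq_eq_eq_not, Bool.not_true] at ha
      subst ha
      obtain ⟨r, rfl⟩ := (PySem.Chars.startswith_iff _ _).mp hs
      rw [okGo]
      simp only [hne, h1, h2, hc, dite_eq_ite, if_false, if_true]
      rw [show List.drop 3 (['w','o','o'] ++ r) = r from rfl, mem_accAux_woo]
      exact IH n' (by simp [numFalse] at hn ⊢; omega)
  | case5 cs a y w m hne h1 h2 h3 hc IH =>
      intro n hn
      obtain ⟨n', rfl⟩ : ∃ k, n = k + 1 := ⟨n - 1, by omega⟩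
      obtain ⟨hs, ha⟩ := Bool.and_eq_true _ _ |>.mp hc
      rw [Bool.not_eq_eq_eq_not, Bool.not_true] at ha
      subst ha
      obtain ⟨r, rfl⟩ := (PySem.Chars.startswith_iff _ _).mp hs
      rw [okGo]
      simp only [hne, h1, h2, h3, hc, dite_eq_ite, if_false, if_true]
      rw [show List.drop 2 (['m','a'] ++ r) = r from rfl, mem_accAux_ma]
      exact IH n' (by simp [numFalse] at hn ⊢; omega)
  | case6 cs a y w m hne h1 h2 h3 h4 =>
      intro n hn
      obtain ⟨n', rfl⟩ : ∃ k, n = k + 1 := ⟨n - 1, by omega⟩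
      rw [okGo]
      simp only [hne, h1, h2, h3, h4, dite_eq_ite, if_false]
      constructor
      · intro h; exact absurd h (by simp)
      · intro h
        exfalso
        rcases mem_accAux_cases h with rfl | ⟨hf, hp⟩ | ⟨hf, hp⟩ | ⟨hf, hp⟩ | ⟨hf, hp⟩
        · exact hne rfl
        · exact h1 (by simp [(PySem.Chars.startswith_iff _ _).mpr hp, hf])
        · exact h2 (by simp [(PySem.Chars.startswith_iff _ _).mpr hp, hf])
        · exact h3 (by simp [(PySem.Chars.startswith_iff _ _).mpr hp, hf])
        · exact h4 (by simp [(PySem.Chars.startswith_iff _ _).mpr hp, hf])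

set_option maxRecDepth 100000 in
lemma combos_all_parse : (ayaRecurse 5 [] ["aya","ye","woo","ma"] PySem.Set.empty).all
    (fun s => decide (s.toList ∈ accAux 5 false false false false)) = true := by decide

set_option maxRecDepth 100000 in
lemma parse_all_combos : (accAux 5 false false false false).all
    (fun cs => decide (cs ∈ (ayaRecurse 5 [] ["aya","ye","woo","ma"] PySem.Set.empty).map String.toList)) = true := by decide

lemma mem_combos_iff (s : String) :
    s ∈ ayaRecurse 5 [] ["aya","ye","woo","ma"] PySem.Set.empty ↔
      okGo s.toList false false false false = true := by
  rw [okGo_iff s.toList false false false false 5 (by simp [numFalse])]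
  constructor
  · intro h
    have := List.all_eq_true.mp combos_all_parse s h
    simpa using this
  · intro h
    have := List.all_eq_true.mp parse_all_combos s.toList h
    simp only [decide_eq_true_eq, List.mem_map] at this
    obtain ⟨t, ht, htl⟩ := this
    rwa [String.toList_inj.mp htl] at ht

-- ===== VERDICT (by name: the statement is the Claim_ definition above) =====
theorem solution_spec : Claim_equal_solution := by
  intro babbling _
  unfold Spec_solution solution solution_alt
  show (PySem.List.pyRange 0 (PySem.List.len babbling) 1).foldl
      (fun answer x => if PySem.List.pyGetD babbling x "" ∈ ayaRecurse 5 [] ["aya","ye","woo","ma"] PySem.Set.empty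
        then answer + 1 else answer) 0 = _
  rw [PySem.List.foldl_pyRange_zero_pyGetD babbling ""
    (fun answer x => if x ∈ ayaRecurse 5 [] ["aya","ye","woo","ma"] PySem.Set.empty then answer + 1 else answer) 0]
  apply PySem.List.foldl_congr_mem'
  intro x _ acc
  have hiff : x ∈ ayaRecurse 5 [] ["aya","ye","woo","ma"] PySem.Set.empty ↔
      okGo x.toList false false false false = true := mem_combos_iff x
  by_cases h : okGo x.toList false false false false = true
  · rw [if_pos (hiff.mpr h), if_pos h]
  · rw [if_neg (fun hm => h (hiff.mp hm)), if_neg h]
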